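-- pv_equiv track=rewrite | github.com/yuanlanfei/paper-tracker1 | scripts/crawler.py | is_non_academic
-- ===== SOURCE A (Python) =====
-- NON_ACADEMIC_PATTERNS = [
--     'celebrating', 'anniversary', 'in memoriam', 'editorial board',
--     'preface:', 'introduction to the issue', 'issue information',
--     'cover image', 'table of contents', 'front matter', 'back matter',
--     'corrigendum', 'erratum', 'retraction', 'retraction note', 'withdrawn',
--     'book review', 'review essay', 'commentary:', 'letter to the editor',
--     'call for papers', 'conference report', 'meeting report', 'proceedings',
--     'about this journal', 'about the authors', 'dedication', 'tribute to',
--     'obituary', 'list of reviewers', 'thank you to reviewers',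
--     'acknowledgement to reviewers', 'annual index', 'index to volume',
--     'author index', 'subject index', 'contents', 'instructions to authors',
-- ]
--
-- NON_ACADEMIC_EXACT = {
--     'reviewers', 'acknowledgment', 'acknowledgments', 'preface',
--     'editorial', 'commentary', 'correction', 'abstracts', 'index',
--     'foreword', 'afterword', 'colophon', 'imprint',
-- }
--
-- def is_non_academic(title):
--     """判断标题是否为非学术性文章"""
--     if not title:
--         return True
--     t = title.lower().strip()
--     if t in NON_ACADEMIC_EXACT:
--         return True
--     for pattern in NON_ACADEMIC_PATTERNS:
--         if pattern in t:
--             return True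
--     return False
-- ===== SOURCE B (Python) =====
-- NON_ACADEMIC_PATTERNS = [
--     'celebrating', 'anniversary', 'in memoriam', 'editorial board',
--     'preface:', 'introduction to the issue', 'issue information',
--     'cover image', 'table of contents', 'front matter', 'back matter',
--     'corrigendum', 'erratum', 'retraction', 'retraction note', 'withdrawn',
--     'book review', 'review essay', 'commentary:', 'letter to the editor',
--     'call for papers', 'conference report', 'meeting report', 'proceedings',
--     'about this journal', 'about the authors', 'dedication', 'tribute to',
--     'obituary', 'list of reviewers', 'thank you to reviewers',
--     'acknowledgement to reviewers', 'annual index', 'index to volume',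
--     'author index', 'subject index', 'contents', 'instructions to authors',
-- ]
--
-- NON_ACADEMIC_EXACT = {
--     'reviewers', 'acknowledgment', 'acknowledgments', 'preface',
--     'editorial', 'commentary', 'correction', 'abstracts', 'index',
--     'foreword', 'afterword', 'colophon', 'imprint',
-- }
--
-- # Patterns grouped by their first character, built once at module load.
-- _BY_FIRST = {}
-- for _p in NON_ACADEMIC_PATTERNS:
--     _BY_FIRST.setdefault(_p[0], []).append(_p)
--
--
-- def _scan(t):
--     """Walk the suffixes of t left to right; at each one try only the
--     patterns that start with its first character."""
--     while t:
--         for p in _BY_FIRST.get(t[0], ()):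
--             if t.startswith(p):
--                 return True
--         t = t[1:]
--     return False
--
--
-- def is_non_academic(title):
--     """判断标题是否为非学术性文章"""
--     if not title:
--         return True
--     t = title.lower().strip()
--     return t in NON_ACADEMIC_EXACT or _scan(t)
-- ===== Notes on version B (the rewrite author's own statement) =====
-- stated objective: alternative
-- what changed: Replaces the 38 independent per-pattern substring scans with a single left-to-right walk over the title's suffixes that, at each suffix, tries only the patterns grouped under its first character in a precomputed first-character dict.
import Mathlib
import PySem

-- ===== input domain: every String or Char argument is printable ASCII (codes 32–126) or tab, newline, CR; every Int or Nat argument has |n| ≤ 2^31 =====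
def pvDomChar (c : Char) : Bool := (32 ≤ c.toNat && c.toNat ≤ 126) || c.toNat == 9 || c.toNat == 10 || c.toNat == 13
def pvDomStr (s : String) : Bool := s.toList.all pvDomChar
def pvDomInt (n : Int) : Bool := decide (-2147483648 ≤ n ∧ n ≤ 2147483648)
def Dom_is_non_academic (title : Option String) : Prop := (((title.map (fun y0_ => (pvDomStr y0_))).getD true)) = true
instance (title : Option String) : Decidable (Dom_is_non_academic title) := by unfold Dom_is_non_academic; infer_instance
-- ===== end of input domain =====

-- B replaces A's 38 independent substring scans by one left-to-right walk over the
-- title's suffixes driven by a first-character index of the patterns; same return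
-- value everywhere (alternative, not measured faster).

-- ===== PORT A =====
def pvPatterns : List String := [
  "celebrating", "anniversary", "in memoriam", "editorial board",
  "preface:", "introduction to the issue", "issue information",
  "cover image", "table of contents", "front matter", "back matter",
  "corrigendum", "erratum", "retraction", "retraction note", "withdrawn",
  "book review", "review essay", "commentary:", "letter to the editor",
  "call for papers", "conference report", "meeting report", "proceedings",
  "about this journal", "about the authors", "dedication", "tribute to",
  "obituary", "list of reviewers", "thank you to reviewers",
  "acknowledgement to reviewers", "annual index", "index to volume",
  "author index", "subject index", "contents", "instructions to authors"]

def pvExact : PySem.Set String := PySem.Set.ofList [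
  "reviewers", "acknowledgment", "acknowledgments", "preface",
  "editorial", "commentary", "correction", "abstracts", "index",
  "foreword", "afterword", "colophon", "imprint"]

def is_non_academic (title : Option String) : Bool :=
  match title with
  | none => true                                   -- `if not title` (None is falsy)
  | some s =>
    if s = "" then true                            -- `if not title` (empty string is falsy)
    else
      let t := PySem.Str.strip (PySem.Str.lower s)
      if pvExact.contains t then true              -- `t in NON_ACADEMIC_EXACT`
      else pvPatterns.any (fun p => PySem.Str.isIn p t)   -- `for pattern ...: if pattern in t: return True`

-- ===== PORT B =====
-- Source B works position-wise over characters, so its port lives on `List Char`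
-- (the Chars side of PySem); the pattern tables are the same literals, exploded.
def pvPatternsB : List (List Char) := [
  ['c', 'e', 'l', 'e', 'b', 'r', 'a', 't', 'i', 'n', 'g'],
  ['a', 'n', 'n', 'i', 'v', 'e', 'r', 's', 'a', 'r', 'y'],
  ['i', 'n', ' ', 'm', 'e', 'm', 'o', 'r', 'i', 'a', 'm'],
  ['e', 'd', 'i', 't', 'o', 'r', 'i', 'a', 'l', ' ', 'b', 'o', 'a', 'r', 'd'],
  ['p', 'r', 'e', 'f', 'a', 'c', 'e', ':'],
  ['i', 'n', 't', 'r', 'o', 'd', 'u', 'c', 't', 'i', 'o', 'n', ' ', 't', 'o', ' ', 't', 'h', 'e', ' ', 'i', 's', 's', 'u', 'e'],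
  ['i', 's', 's', 'u', 'e', ' ', 'i', 'n', 'f', 'o', 'r', 'm', 'a', 't', 'i', 'o', 'n'],
  ['c', 'o', 'v', 'e', 'r', ' ', 'i', 'm', 'a', 'g', 'e'],
  ['t', 'a', 'b', 'l', 'e', ' ', 'o', 'f', ' ', 'c', 'o', 'n', 't', 'e', 'n', 't', 's'],
  ['f', 'r', 'o', 'n', 't', ' ', 'm', 'a', 't', 't', 'e', 'r'],
  ['b', 'a', 'c', 'k', ' ', 'm', 'a', 't', 't', 'e', 'r'],
  ['c', 'o', 'r', 'r', 'i', 'g', 'e', 'n', 'd', 'u', 'm'],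
  ['e', 'r', 'r', 'a', 't', 'u', 'm'],
  ['r', 'e', 't', 'r', 'a', 'c', 't', 'i', 'o', 'n'],
  ['r', 'e', 't', 'r', 'a', 'c', 't', 'i', 'o', 'n', ' ', 'n', 'o', 't', 'e'],
  ['w', 'i', 't', 'h', 'd', 'r', 'a', 'w', 'n'],
  ['b', 'o', 'o', 'k', ' ', 'r', 'e', 'v', 'i', 'e', 'w'],
  ['r', 'e', 'v', 'i', 'e', 'w', ' ', 'e', 's', 's', 'a', 'y'],
  ['c', 'o', 'm', 'm', 'e', 'n', 't', 'a', 'r', 'y', ':'],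
  ['l', 'e', 't', 't', 'e', 'r', ' ', 't', 'o', ' ', 't', 'h', 'e', ' ', 'e', 'd', 'i', 't', 'o', 'r'],
  ['c', 'a', 'l', 'l', ' ', 'f', 'o', 'r', ' ', 'p', 'a', 'p', 'e', 'r', 's'],
  ['c', 'o', 'n', 'f', 'e', 'r', 'e', 'n', 'c', 'e', ' ', 'r', 'e', 'p', 'o', 'r', 't'],
  ['m', 'e', 'e', 't', 'i', 'n', 'g', ' ', 'r', 'e', 'p', 'o', 'r', 't'],
  ['p', 'r', 'o', 'c', 'e', 'e', 'd', 'i', 'n', 'g', 's'],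
  ['a', 'b', 'o', 'u', 't', ' ', 't', 'h', 'i', 's', ' ', 'j', 'o', 'u', 'r', 'n', 'a', 'l'],
  ['a', 'b', 'o', 'u', 't', ' ', 't', 'h', 'e', ' ', 'a', 'u', 't', 'h', 'o', 'r', 's'],
  ['d', 'e', 'd', 'i', 'c', 'a', 't', 'i', 'o', 'n'],
  ['t', 'r', 'i', 'b', 'u', 't', 'e', ' ', 't', 'o'],
  ['o', 'b', 'i', 't', 'u', 'a', 'r', 'y'],
  ['l', 'i', 's', 't', ' ', 'o', 'f', ' ', 'r', 'e', 'v', 'i', 'e', 'w', 'e', 'r', 's'],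
  ['t', 'h', 'a', 'n', 'k', ' ', 'y', 'o', 'u', ' ', 't', 'o', ' ', 'r', 'e', 'v', 'i', 'e', 'w', 'e', 'r', 's'],
  ['a', 'c', 'k', 'n', 'o', 'w', 'l', 'e', 'd', 'g', 'e', 'm', 'e', 'n', 't', ' ', 't', 'o', ' ', 'r', 'e', 'v', 'i', 'e', 'w', 'e', 'r', 's'],
  ['a', 'n', 'n', 'u', 'a', 'l', ' ', 'i', 'n', 'd', 'e', 'x'],
  ['i', 'n', 'd', 'e', 'x', ' ', 't', 'o', ' ', 'v', 'o', 'l', 'u', 'm', 'e'],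
  ['a', 'u', 't', 'h', 'o', 'r', ' ', 'i', 'n', 'd', 'e', 'x'],
  ['s', 'u', 'b', 'j', 'e', 'c', 't', ' ', 'i', 'n', 'd', 'e', 'x'],
  ['c', 'o', 'n', 't', 'e', 'n', 't', 's'],
  ['i', 'n', 's', 't', 'r', 'u', 'c', 't', 'i', 'o', 'n', 's', ' ', 't', 'o', ' ', 'a', 'u', 't', 'h', 'o', 'r', 's']]

def pvExactB : PySem.Set (List Char) := PySem.Set.ofList [
  ['r', 'e', 'v', 'i', 'e', 'w', 'e', 'r', 's'],
  ['a', 'c', 'k', 'n', 'o', 'w', 'l', 'e', 'd', 'g', 'm', 'e', 'n', 't'],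
  ['a', 'c', 'k', 'n', 'o', 'w', 'l', 'e', 'd', 'g', 'm', 'e', 'n', 't', 's'],
  ['p', 'r', 'e', 'f', 'a', 'c', 'e'],
  ['e', 'd', 'i', 't', 'o', 'r', 'i', 'a', 'l'],
  ['c', 'o', 'm', 'm', 'e', 'n', 't', 'a', 'r', 'y'],
  ['c', 'o', 'r', 'r', 'e', 'c', 't', 'i', 'o', 'n'],
  ['a', 'b', 's', 't', 'r', 'a', 'c', 't', 's'],
  ['i', 'n', 'd', 'e', 'x'],
  ['f', 'o', 'r', 'e', 'w', 'o', 'r', 'd'],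
  ['a', 'f', 't', 'e', 'r', 'w', 'o', 'r', 'd'],
  ['c', 'o', 'l', 'o', 'p', 'h', 'o', 'n'],
  ['i', 'm', 'p', 'r', 'i', 'n', 't']]

-- `_BY_FIRST.setdefault(p[0], []).append(p)`; every pattern is nonempty, so `p[0]`
-- is `p.headD ' '` (the default is never used).
def pvByFirstB : PySem.Dict Char (List (List Char)) :=
  pvPatternsB.foldl
    (fun d p => d.insert (p.headD ' ') (d.getD (p.headD ' ') [] ++ [p]))
    PySem.Dict.empty

-- `_scan`: `while t: for p in _BY_FIRST.get(t[0], ()): if t.startswith(p): return True; t = t[1:]`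
def pvScanB : List Char → Bool
  | [] => false
  | c :: rest =>
      if (pvByFirstB.getD c []).any (fun p => PySem.Chars.startswith (c :: rest) p) then true
      else pvScanB rest

def is_non_academic_alt (title : Option String) : Bool :=
  match title with
  | none => true
  | some s =>
    if s.toList.isEmpty then true
    else
      let t := PySem.Chars.strip (PySem.Chars.lower s.toList)
      pvExactB.contains t || pvScanB t

-- ===== PRECONDITION & SPEC =====
def Spec_is_non_academic (title : Option String) (out : Bool) : Prop := out = is_non_academic_alt title
instance (title : Option String) (out : Bool) : Decidable (Spec_is_non_academic title out) := by unfold Spec_is_non_academic; infer_instance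

-- ===== CLAIM (what is proved, stated in full; the proofs are below) =====
def Claim_equal_is_non_academic : Prop := ∀ (title : Option String), Dom_is_non_academic title → Spec_is_non_academic title (is_non_academic title)

-- ===== LEMMAS AND PROOFS =====

-- the grouping fold: looking up c after folding xs appends exactly the xs whose first char is c
theorem pv_foldl_group (xs : List (List Char)) (d : PySem.Dict Char (List (List Char))) (c : Char) :
    (xs.foldl
      (fun d p => d.insert (p.headD ' ') (d.getD (p.headD ' ') [] ++ [p])) d).getD c []
    = d.getD c [] ++ xs.filter (fun p => p.headD ' ' == c) := by
  induction xs generalizing d with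
  | nil => simp
  | cons p xs ih =>
    simp only [List.foldl_cons, ih, List.filter_cons]
    rw [PySem.Dict.getD_insert]
    by_cases h : p.headD ' ' = c
    · simp only [List.headD_eq_head?_getD] at h
      simp [h]
    · simp only [List.headD_eq_head?_getD] at h
      simp [h, Ne.symm h]

theorem pv_byFirstB_getD (c : Char) :
    pvByFirstB.getD c [] = pvPatternsB.filter (fun p => p.headD ' ' == c) := by
  have h := pv_foldl_group pvPatternsB PySem.Dict.empty c
  simpa [pvByFirstB] using h

theorem pv_patternsB_eq : pvPatternsB = pvPatterns.map String.toList := by decide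

theorem pv_patternsB_ne_nil : ∀ p ∈ pvPatternsB, p ≠ [] := by decide

theorem pv_exactB_eq : pvExactB = pvExact.map String.toList := by decide

-- the exact-set test is the same on either side of the String ↔ List Char bridge
theorem pv_exact_bridge (t : String) :
    pvExactB.contains t.toList = pvExact.contains t := by
  rw [Bool.eq_iff_iff]
  simp only [PySem.Set.contains_iff, pv_exactB_eq, List.mem_map]
  constructor
  · rintro ⟨u, hu, he⟩
    have hut : u = t := by
      have h2 := congrArg String.ofList he
      simpa using h2
    exact hut ▸ hu
  · intro ht; exact ⟨t, ht, rfl⟩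

-- the suffix walk accepts l iff some pattern is a prefix of some suffix of l
theorem pv_scan_iff (l : List Char) :
    pvScanB l = true ↔ ∃ p ∈ pvPatternsB, ∃ j, p <+: l.drop j := by
  induction l with
  | nil =>
    simp only [pvScanB, List.drop_nil]
    constructor
    · intro h; cases h
    · rintro ⟨p, hp, j, hpre⟩
      exact absurd (List.prefix_nil.mp hpre) (pv_patternsB_ne_nil p hp)
  | cons c rest ih =>
    rw [pvScanB]
    constructor
    · intro h
      split at h
      · next hany =>
        simp only [List.any_eq_true, pv_byFirstB_getD, List.mem_filter] at hany
        obtain ⟨p, ⟨hp, -⟩, hpre⟩ := hany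
        exact ⟨p, hp, 0, by simpa using (PySem.Chars.startswith_iff _ _).mp hpre⟩
      · obtain ⟨p, hp, j, hpre⟩ := ih.mp h
        exact ⟨p, hp, j + 1, by simpa using hpre⟩
    · rintro ⟨p, hp, j, hpre⟩
      cases j with
      | succ j =>
        split
        · rfl
        · exact ih.mpr ⟨p, hp, j, by simpa using hpre⟩
      | zero =>
        split
        · rfl
        · next hnot =>
          exfalso; apply hnot
          obtain ⟨a, as, rfl⟩ := List.exists_cons_of_ne_nil (pv_patternsB_ne_nil p hp)
          rw [List.drop_zero, List.cons_prefix_cons] at hpre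
          simp only [List.any_eq_true, pv_byFirstB_getD, List.mem_filter]
          refine ⟨a :: as, ⟨hp, by simp [hpre.1]⟩, ?_⟩
          exact (PySem.Chars.startswith_iff _ _).mpr
            (List.cons_prefix_cons.mpr hpre)

-- hence the walk computes exactly A's disjunction of substring tests
theorem pv_scan_eq (l : List Char) :
    pvScanB l = pvPatternsB.any (fun p => PySem.Chars.isIn p l) := by
  rw [Bool.eq_iff_iff]
  simp only [List.any_eq_true]
  rw [pv_scan_iff]
  exact exists_congr fun p => and_congr_right fun _ =>
    PySem.Chars.exists_prefix_drop_iff_isIn p l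

-- ===== VERDICT (by name: the statement is the Claim_ definition above) =====
theorem is_non_academic_spec : Claim_equal_is_non_academic := by
  intro title _
  unfold Spec_is_non_academic
  cases title with
  | none => rfl
  | some s =>
    simp only [is_non_academic, is_non_academic_alt]
    by_cases hs : s = ""
    · simp [hs]
    · have hne : s.toList ≠ [] := fun h => hs (by simpa using congrArg String.ofList h)
      simp only [hs, reduceIte, List.isEmpty_eq_false_iff.mpr hne, Bool.false_eq_true, reduceIte]
      have htl : (PySem.Str.strip (PySem.Str.lower s)).toList
          = PySem.Chars.strip (PySem.Chars.lower s.toList) := by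
        simp
      rw [← htl, pv_exact_bridge, pv_scan_eq, pv_patternsB_eq, List.any_map]
      simp [Function.comp_def, PySem.Str.isIn_eq]
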